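-- pv_equiv track=rewrite | github.com/seangief/euler_project | Euler43.py | Euler43
-- ===== SOURCE A (Python) =====
-- def Euler43(bound):
--     factorials = [1,1,2,6,24,120,720,5040,40320,362880]
--     factn = []
--     for i in range(1,bound):
--         istring = str(i)
--         total = 0
--         for j in range(0,len(istring)):
--             total += factorials[int(istring[j])]
--         if total == i:
--             factn.append(i)
--     return factn
-- ===== SOURCE B (Python) =====
-- def Euler43(bound):
--     factorials = [1, 1, 2, 6, 24, 120, 720, 5040, 40320, 362880]
--
--     def digit_fact_sum(n):
--         t = 0
--         while n > 0:
--             t += factorials[n % 10]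
--             n //= 10
--         return t
--
--     return [i for i in range(1, bound) if digit_fact_sum(i) == i]
-- ===== Notes on version B (the rewrite author's own statement) =====
-- stated objective: faster
-- what changed: B extracts digits arithmetically (a divmod loop) instead of formatting each number as a string and re-parsing every character with int(), and collects results with a filter comprehension instead of an append loop.
import Mathlib
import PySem

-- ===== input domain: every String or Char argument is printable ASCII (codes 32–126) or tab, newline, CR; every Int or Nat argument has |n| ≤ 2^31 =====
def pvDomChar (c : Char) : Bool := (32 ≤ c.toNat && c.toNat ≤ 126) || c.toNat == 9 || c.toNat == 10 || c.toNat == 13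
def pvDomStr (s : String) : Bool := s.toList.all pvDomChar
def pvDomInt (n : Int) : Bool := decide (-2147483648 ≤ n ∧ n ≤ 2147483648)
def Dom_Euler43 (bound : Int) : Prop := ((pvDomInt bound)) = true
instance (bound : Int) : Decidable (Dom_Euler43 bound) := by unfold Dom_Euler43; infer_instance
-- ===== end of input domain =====

-- B replaces A's per-number string formatting and per-character int() parsing by an arithmetic
-- divmod digit loop and a filter comprehension (objective: faster, constant factor).

-- ===== PORT A =====
-- factorials[int(istring[j])]: istring[j] and int() never fail here (j ranges over the string,
-- every character of str(i) for i ≥ 1 is a digit), so the option defaults below never fire.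
def pvCharTerm (factorials : List Int) (c : Char) : Int :=
  PySem.List.pyGetD factorials ((PySem.Int.ofChars? [c]).getD 0) 0

def Euler43 (bound : Int) : List Int :=
  let factorials : List Int := [1, 1, 2, 6, 24, 120, 720, 5040, 40320, 362880]
  (PySem.List.pyRange 1 bound 1).foldl
    (fun factn i =>
      let istring := PySem.Int.toStr i
      let total :=
        (PySem.List.pyRange 0 (PySem.Str.len istring) 1).foldl
          (fun total j => total + pvCharTerm factorials (PySem.List.pyGetD istring.toList j ' '))
          0
      if total == i then factn ++ [i] else factn)
    []

-- ===== PORT B =====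
-- the 'while n > 0: t += factorials[n % 10]; n //= 10' loop of Source B
def pvDigitFactSum (n : Int) (t : Int) : Int :=
  if h : 0 < n then
    pvDigitFactSum (PySem.Int.floordiv n 10)
      (t + PySem.List.pyGetD [1, 1, 2, 6, 24, 120, 720, 5040, 40320, 362880] (PySem.Int.mod n 10) 0)
  else t
termination_by n.toNat
decreasing_by
  have h10 : (0:Int) < 10 := by norm_num
  have : PySem.Int.floordiv n 10 = n / 10 := PySem.Int.floordiv_eq_ediv_of_pos h10
  rw [this]
  omega

def Euler43_alt (bound : Int) : List Int :=
  (PySem.List.pyRange 1 bound 1).filter (fun i => pvDigitFactSum i 0 == i)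

-- ===== PRECONDITION & SPEC =====
def Spec_Euler43 (bound : Int) (out : List Int) : Prop := out = Euler43_alt bound
instance (bound : Int) (out : List Int) : Decidable (Spec_Euler43 bound out) := by unfold Spec_Euler43; infer_instance

-- ===== CLAIM (what is proved, stated in full; the proofs are below) =====
def Claim_equal_Euler43 : Prop := ∀ (bound : Int), Dom_Euler43 bound → Spec_Euler43 bound (Euler43 bound)

-- ===== LEMMAS AND PROOFS =====

def pvFacts : List Int := [1, 1, 2, 6, 24, 120, 720, 5040, 40320, 362880]

-- Nat.toDigitsCore unwound: for 1 ≤ n (and enough fuel) it is the base-10 digits, high first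
lemma pvToDigitsCore_eq : ∀ (f n : Nat) (acc : List Char), 1 ≤ n → n < 10 ^ f →
    Nat.toDigitsCore 10 f n acc = (Nat.digits 10 n).reverse.map Nat.digitChar ++ acc := by
  intro f
  induction f with
  | zero => intro n acc h1 h2; omega
  | succ f ih =>
    intro n acc h1 h2
    rw [Nat.toDigitsCore]
    have hd : Nat.digits 10 n = n % 10 :: Nat.digits 10 (n / 10) := by
      rcases n with _ | m
      · omega
      · simpa using Nat.digits_add_two_add_one (b := 8) (n := m)
    by_cases hz : n / 10 = 0
    · simp only [hz]
      have : Nat.digits 10 (n / 10) = [] := by rw [hz]; simp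
      simp [hd, this]
    · simp only [if_neg hz]
      rw [ih (n / 10) _ (by omega) (by
        exact (Nat.div_lt_iff_lt_mul (by norm_num : 0 < 10)).mpr
          (by calc n < 10 ^ (f + 1) := h2
                _ = 10 ^ f * 10 := by ring))]
      rw [hd]
      simp

lemma pvToDigits_eq (n : Nat) (h : 1 ≤ n) :
    Nat.toDigits 10 n = (Nat.digits 10 n).reverse.map Nat.digitChar := by
  have := pvToDigitsCore_eq (n + 1) n [] h (by
    calc n < 10 ^ n := Nat.lt_pow_self (by norm_num)
      _ ≤ 10 ^ (n + 1) := Nat.pow_le_pow_right (by norm_num) (by omega))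
  simpa [Nat.toDigits] using this

-- the per-character term of A on a digit character is B's table term on the digit
lemma pvCharTerm_digitChar (d : Nat) (hd : d < 10) :
    pvCharTerm pvFacts (Nat.digitChar d) = PySem.List.pyGetD pvFacts (d : Int) 0 := by
  interval_cases d <;> decide

-- B's loop computes the digit-factorial sum over Nat.digits
lemma pvDigitFactSum_eq (m : Nat) (t : Int) :
    pvDigitFactSum (m : Int) t = t + ((Nat.digits 10 m).map (fun (d : Nat) => PySem.List.pyGetD pvFacts (d : Int) 0)).sum := by
  induction m using Nat.strong_induction_on generalizing t with
  | _ m ih =>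
    rcases Nat.eq_zero_or_pos m with hm | hm
    · subst hm
      rw [pvDigitFactSum]
      simp
    · rw [pvDigitFactSum]
      have hpos : (0:Int) < (m : Int) := by exact_mod_cast hm
      rw [dif_pos hpos]
      have hfd : PySem.Int.floordiv (m : Int) 10 = ((m / 10 : Nat) : Int) := by
        exact_mod_cast PySem.Int.floordiv_natCast m 10
      have hmd : PySem.Int.mod (m : Int) 10 = ((m % 10 : Nat) : Int) := by
        exact_mod_cast PySem.Int.mod_natCast m 10
      rw [hfd, hmd, ih (m / 10) (Nat.div_lt_self hm (by norm_num))]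
      have hd : Nat.digits 10 m = m % 10 :: Nat.digits 10 (m / 10) := by
        rcases m with _ | k
        · omega
        · simpa using Nat.digits_add_two_add_one (b := 8) (n := k)
      rw [hd]
      simp only [List.map_cons, List.sum_cons, pvFacts]
      ring

-- A's inner string loop equals B's divmod loop, for the positive i the outer range produces
lemma pvInner_eq (i : Int) (hi : 1 ≤ i) :
    (PySem.List.pyRange 0 (PySem.Str.len (PySem.Int.toStr i)) 1).foldl
      (fun total j => total + pvCharTerm pvFacts (PySem.List.pyGetD (PySem.Int.toStr i).toList j ' '))
      0 = pvDigitFactSum i 0 := by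
  have hne : ¬ i < 0 := by omega
  have htl : (PySem.Int.toStr i).toList = Nat.toDigits 10 i.toNat := by
    rw [PySem.Int.toList_toStr, PySem.Int.toChars]
    simp [hne]
  have hnat : 1 ≤ i.toNat := by omega
  have hlen : PySem.Str.len (PySem.Int.toStr i) = ((PySem.Int.toStr i).toList.length : Int) := by
    simp [PySem.Str.len_eq]
  rw [hlen, PySem.List.foldl_pyRange_zero_pyGetD' ((PySem.Int.toStr i).toList) ' '
    (fun total c => total + pvCharTerm pvFacts c) 0]
  rw [PySem.List.foldl_add (g := fun c => pvCharTerm pvFacts c)]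
  rw [htl, pvToDigits_eq i.toNat hnat]
  have hmap : ((Nat.digits 10 i.toNat).reverse.map Nat.digitChar).map (fun c => pvCharTerm pvFacts c)
      = (Nat.digits 10 i.toNat).reverse.map (fun (d : Nat) => PySem.List.pyGetD pvFacts (d : Int) 0) := by
    rw [List.map_map]
    apply List.map_congr_left
    intro d hdmem
    have hdlt : d < 10 := Nat.digits_lt_base (by norm_num) (List.mem_reverse.mp hdmem)
    exact pvCharTerm_digitChar d hdlt
  rw [hmap, List.map_reverse, List.sum_reverse]
  have : pvDigitFactSum i 0 = pvDigitFactSum ((i.toNat : Nat) : Int) 0 := by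
    congr 1
    omega
  rw [this, pvDigitFactSum_eq]

-- ===== VERDICT (by name: the statement is the Claim_ definition above) =====
theorem Euler43_spec : Claim_equal_Euler43 := by
  intro bound _
  show Euler43 bound = Euler43_alt bound
  dsimp only [Euler43, Euler43_alt]
  rw [show ([1, 1, 2, 6, 24, 120, 720, 5040, 40320, 362880] : List Int) = pvFacts from rfl]
  rw [PySem.List.foldl_append_if_eq_filter
    (p := fun i =>
      ((PySem.List.pyRange 0 (PySem.Str.len (PySem.Int.toStr i)) 1).foldl
        (fun total j => total + pvCharTerm pvFacts (PySem.List.pyGetD (PySem.Int.toStr i).toList j ' '))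
        0) == i)]
  rw [List.nil_append]
  apply List.filter_congr
  intro i hmem
  have hi : 1 ≤ i := (PySem.List.mem_pyRange_one.mp hmem).1
  rw [pvInner_eq i hi]
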